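-- pv_equiv track=rewrite | github.com/TeeRenJing/AOC-2021 | Advent of Code 2021/day10 part 2 (STACK DATA STRUCTURE).py | findtotalscores
-- ===== SOURCE A (Python) =====
-- def findtotalscores(list):
--     score = 0
--     for closingstr in list:
--         score *= 5
--         if closingstr == ")":
--             score += 1
--         elif closingstr == "]":
--             score += 2
--         elif closingstr == "}":
--             score += 3
--         elif closingstr == ">":
--             score += 4
--     return score
-- ===== SOURCE B (Python) =====
-- # Divide and conquer: value(l) = value(left) * 5**len(right) + value(right),
-- # combining halves with balanced big-integer multiplications.
-- def _val(c):
--     if c == ")":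
--         return 1
--     elif c == "]":
--         return 2
--     elif c == "}":
--         return 3
--     elif c == ">":
--         return 4
--     else:
--         return 0
--
-- def _go(l):
--     # returns (score of l, 5 ** len(l))
--     n = len(l)
--     if n == 0:
--         return (0, 1)
--     if n == 1:
--         return (_val(l[0]), 5)
--     m = n // 2
--     s1, p1 = _go(l[:m])
--     s2, p2 = _go(l[m:])
--     return (s1 * p2 + s2, p1 * p2)
--
-- def findtotalscores(list):
--     return _go(list)[0]
-- ===== Notes on version B (the rewrite author's own statement) =====
-- stated objective: alternative
-- what changed: Replaces the left-to-right Horner loop by a divide-and-conquer evaluation, value(l) = value(left)*5^len(right) + value(right), combining halves with balanced big-integer multiplications; it trades A's one small multiply-by-5 per element for O(log n) levels of balanced big-int products.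
import Mathlib
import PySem

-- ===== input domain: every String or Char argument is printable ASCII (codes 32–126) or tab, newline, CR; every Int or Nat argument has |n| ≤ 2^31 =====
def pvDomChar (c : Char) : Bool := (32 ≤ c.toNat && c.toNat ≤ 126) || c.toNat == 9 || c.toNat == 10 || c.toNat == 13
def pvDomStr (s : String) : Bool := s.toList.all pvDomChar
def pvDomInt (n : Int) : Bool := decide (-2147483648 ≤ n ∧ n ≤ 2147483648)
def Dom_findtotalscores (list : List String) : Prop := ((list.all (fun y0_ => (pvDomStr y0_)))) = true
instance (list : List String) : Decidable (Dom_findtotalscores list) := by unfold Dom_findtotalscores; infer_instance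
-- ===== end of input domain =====

-- B replaces A's left-to-right Horner loop by divide-and-conquer: value(l) = value(left)*5^len(right) + value(right).

-- ===== PORT A =====
-- one loop iteration of A: score *= 5, then the if/elif chain
def fAstep (score : Int) (closingstr : String) : Int :=
  let score := score * 5
  if closingstr = ")" then score + 1
  else if closingstr = "]" then score + 2
  else if closingstr = "}" then score + 3
  else if closingstr = ">" then score + 4
  else score

def findtotalscores (list : List String) : Int :=
  list.foldl fAstep 0

-- ===== PORT B =====
-- B's helper _val
def valB (c : String) : Int :=
  if c = ")" then 1
  else if c = "]" then 2
  else if c = "}" then 3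
  else if c = ">" then 4
  else 0

-- B's helper _go: returns (score of l, 5 ** len(l)); l[:m] / l[m:] are take / drop
def goB (l : List String) : Int × Int :=
  if l.length = 0 then (0, 1)
  else if l.length = 1 then
    (match l with
     | c :: _ => (valB c, 5)
     | [] => (0, 1))
  else
    let m := l.length / 2
    let r1 := goB (l.take m)
    let r2 := goB (l.drop m)
    (r1.1 * r2.2 + r2.1, r1.2 * r2.2)
termination_by l.length
decreasing_by
  · simp only [List.length_take]; omega
  · simp only [List.length_drop]; omega

def findtotalscores_alt (list : List String) : Int :=
  (goB list).1

-- ===== PRECONDITION & SPEC =====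
def Spec_findtotalscores (list : List String) (out : Int) : Prop := out = findtotalscores_alt list
instance (list : List String) (out : Int) : Decidable (Spec_findtotalscores list out) := by unfold Spec_findtotalscores; infer_instance

-- ===== CLAIM (what is proved, stated in full; the proofs are below) =====
def Claim_equal_findtotalscores : Prop := ∀ (list : List String), Dom_findtotalscores list → Spec_findtotalscores list (findtotalscores list)

-- ===== LEMMAS AND PROOFS =====

theorem fAstep_eq (s : Int) (c : String) : fAstep s c = 5 * s + valB c := by
  simp only [fAstep, valB]
  split_ifs <;> ring

theorem pvA_gen (l : List String) : ∀ s : Int,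
    l.foldl fAstep s = s * 5 ^ l.length + l.foldl fAstep 0 := by
  induction l with
  | nil => intro s; simp
  | cons c t ih =>
      intro s
      rw [List.foldl_cons, List.foldl_cons, List.length_cons, ih (fAstep s c),
        ih (fAstep 0 c), fAstep_eq, fAstep_eq, pow_succ]
      ring

theorem goB_eq (l : List String) : goB l = (l.foldl fAstep 0, 5 ^ l.length) := by
  rw [goB.eq_def]
  split_ifs with h0 h1
  · obtain rfl : l = [] := List.length_eq_zero_iff.mp h0
    simp
  · cases l with
    | nil => simp at h0
    | cons c t =>
      cases t with
      | nil => simp [fAstep_eq]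
      | cons d u => simp [List.length_cons] at h1
  · have ht := goB_eq (l.take (l.length / 2))
    have hd := goB_eq (l.drop (l.length / 2))
    simp only [ht, hd]
    have hsplit : l = l.take (l.length / 2) ++ l.drop (l.length / 2) :=
      (List.take_append_drop _ l).symm
    rw [Prod.mk.injEq]
    constructor
    · conv_rhs => rw [hsplit]
      rw [List.foldl_append,
        pvA_gen (l.drop (l.length / 2)) (List.foldl fAstep 0 (l.take (l.length / 2)))]
    · rw [← pow_add, List.length_take, List.length_drop]
      congr 1
      omega
termination_by l.length
decreasing_by
  · simp only [List.length_take]; omega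
  · simp only [List.length_drop]; omega

-- ===== VERDICT (by name: the statement is the Claim_ definition above) =====
theorem findtotalscores_spec : Claim_equal_findtotalscores := by
  intro l _
  unfold Spec_findtotalscores findtotalscores findtotalscores_alt
  rw [goB_eq]
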